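-- pv_equiv track=rewrite | github.com/SohaibAamir28/CALICO-Fall-25 | problem-4/main.py | c_s_r
-- ===== SOURCE A (Python) =====
-- def c_s_r(line_rocks, l_t):
--     a = 0
--     for i in range(len(line_rocks)):
--         p_t, x, y = line_rocks[i]
--         c_t_p_a = False
--         if l_t == 'horiz' or l_t == 'vert':
--             if p_t in ('R', 'Q'):
--                 c_t_p_a = True
--         elif l_t == 'diag':
--             if p_t in ('B', 'Q'):
--                 c_t_p_a = True
--         if c_t_p_a:
--             if i > 0:
--                 a += 1
--             if i < len(line_rocks) - 1:
--                 a += 1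
--     return a
-- ===== SOURCE B (Python) =====
-- def c_s_r(line_rocks, l_t):
--     if l_t == 'horiz' or l_t == 'vert':
--         att = ('R', 'Q')
--     elif l_t == 'diag':
--         att = ('B', 'Q')
--     else:
--         att = ()
--     total = 0
--     for (p, _x, _y), (q, _x2, _y2) in zip(line_rocks, line_rocks[1:]):
--         total += (p in att) + (q in att)
--     return total
-- ===== Notes on version B (the rewrite author's own statement) =====
-- stated objective: alternative
-- what changed: Replaces A's per-index loop with boundary checks by a sliding-window pass over adjacent pairs (zip of the list with its shift), adding the attacker indicator of each member of each pair; each attacker is counted once per neighbour it has, so no index arithmetic or endpoint correction is needed.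
import Mathlib
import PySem

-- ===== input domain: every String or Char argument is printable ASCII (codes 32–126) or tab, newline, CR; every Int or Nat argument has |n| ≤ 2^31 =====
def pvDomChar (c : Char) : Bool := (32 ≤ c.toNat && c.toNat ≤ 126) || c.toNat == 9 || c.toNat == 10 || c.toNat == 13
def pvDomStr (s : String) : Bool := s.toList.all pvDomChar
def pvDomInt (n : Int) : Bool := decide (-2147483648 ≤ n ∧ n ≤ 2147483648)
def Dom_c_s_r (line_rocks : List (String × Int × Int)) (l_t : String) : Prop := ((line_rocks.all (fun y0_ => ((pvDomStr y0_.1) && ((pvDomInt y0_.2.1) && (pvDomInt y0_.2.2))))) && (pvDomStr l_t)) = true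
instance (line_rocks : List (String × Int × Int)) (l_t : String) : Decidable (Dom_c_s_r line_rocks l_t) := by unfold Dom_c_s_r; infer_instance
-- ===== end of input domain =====

-- B walks over the adjacent pairs (zip of the list with its shift) and adds the attacker
-- indicator of each member of each pair, instead of A's per-index boundary bookkeeping;
-- objective: alternative (same cost, no index arithmetic).

-- ===== PORT A =====
def c_s_r (line_rocks : List (String × Int × Int)) (l_t : String) : Int :=
  (PySem.List.pyRange 0 (line_rocks.length : Int) 1).foldl (fun a i =>
    let t := PySem.List.pyGetD line_rocks i ("", 0, 0)
    let p_t := t.1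
    let c_t_p_a : Bool :=
      if l_t == "horiz" || l_t == "vert" then p_t == "R" || p_t == "Q"
      else if l_t == "diag" then p_t == "B" || p_t == "Q"
      else false
    if c_t_p_a then
      let a1 := if i > 0 then a + 1 else a
      if i < (line_rocks.length : Int) - 1 then a1 + 1 else a1
    else a) 0

-- ===== PORT B =====
def c_s_r_alt (line_rocks : List (String × Int × Int)) (l_t : String) : Int :=
  let att : List String :=
    if l_t == "horiz" || l_t == "vert" then ["R", "Q"]
    else if l_t == "diag" then ["B", "Q"]
    else []
  (line_rocks.zip (line_rocks.drop 1)).foldl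
    (fun total pq =>
      total + (if att.contains pq.1.1 then 1 else 0)
            + (if att.contains pq.2.1 then 1 else 0)) 0

-- ===== PRECONDITION & SPEC =====
def Spec_c_s_r (line_rocks : List (String × Int × Int)) (l_t : String) (out : Int) : Prop := out = c_s_r_alt line_rocks l_t
instance (line_rocks : List (String × Int × Int)) (l_t : String) (out : Int) : Decidable (Spec_c_s_r line_rocks l_t out) := by unfold Spec_c_s_r; infer_instance

-- ===== CLAIM (what is proved, stated in full; the proofs are below) =====
def Claim_equal_c_s_r : Prop := ∀ (line_rocks : List (String × Int × Int)) (l_t : String), Dom_c_s_r line_rocks l_t → Spec_c_s_r line_rocks l_t (c_s_r line_rocks l_t)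

-- ===== LEMMAS AND PROOFS =====

-- indicator of the last element satisfying b (0 on the empty list)
def pvLastInd {T : Type} (b : T → Bool) (xs : List T) : Int :=
  match xs.getLast? with
  | some x => if b x then 1 else 0
  | none => 0

theorem pvLastInd_cons_cons {T : Type} (b : T → Bool) (y z : T) (t : List T) :
    pvLastInd b (y :: z :: t) = pvLastInd b (z :: t) := by
  unfold pvLastInd
  rw [List.getLast?_cons_cons]

-- sum of A's per-index contributions for a tail sitting at offset k ≥ 1:
-- every attacker contributes 2 except the last one, which contributes 1.
theorem pv_tailSum {T : Type} (b : T → Bool) (d : T) :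
    ∀ (t : List T) (k : Int), 1 ≤ k →
    ((List.range t.length).map (fun j =>
        if b (t.getD j d) then
          ((if 0 < k + (j : Int) then (1:Int) else 0) +
           (if k + (j : Int) < k + (t.length : Int) - 1 then (1:Int) else 0))
        else 0)).sum
      = 2 * (t.countP b : Int) - pvLastInd b t := by
  intro t
  induction t with
  | nil => intro k hk; simp [pvLastInd]
  | cons y t' ih =>
    intro k hk
    rw [List.length_cons, List.range_succ_eq_map, List.map_cons, List.map_map, List.sum_cons]
    have hmap : (List.range t'.length).map
        ((fun j =>
          if b ((y :: t').getD j d) then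
            ((if 0 < k + (j : Int) then (1:Int) else 0) +
             (if k + (j : Int) < k + ((t'.length + 1 : Nat) : Int) - 1 then (1:Int) else 0))
          else 0) ∘ Nat.succ)
        = (List.range t'.length).map (fun j =>
          if b (t'.getD j d) then
            ((if 0 < (k + 1) + (j : Int) then (1:Int) else 0) +
             (if (k + 1) + (j : Int) < (k + 1) + (t'.length : Int) - 1 then (1:Int) else 0))
          else 0) := by
      apply List.map_congr_left
      intro j hj
      simp only [Function.comp_apply, Nat.succ_eq_add_one, List.getD_cons_succ, List.length_cons]
      by_cases hb : b (t'.getD j d) = true <;> simp only [hb, if_true, if_false] <;>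
        push_cast <;> (try split_ifs) <;> omega
    rw [hmap, ih (k + 1) (by omega)]
    rw [List.countP_cons]
    cases t' with
    | nil =>
      simp only [List.getD_cons_zero, List.length_cons, List.length_nil, List.countP_nil]
      unfold pvLastInd
      by_cases hb : b y = true <;> simp [hb] <;> (try split_ifs) <;> omega
    | cons z t'' =>
      rw [pvLastInd_cons_cons]
      simp only [List.getD_cons_zero, List.length_cons]
      by_cases hb : b y = true <;> simp only [hb, if_true, if_false] <;>
        push_cast <;> (try split_ifs) <;> omega

-- the full sum: A's loop value in closed form (also 0 = 0 on the empty list)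
theorem pv_mainSum {T : Type} (b : T → Bool) (d : T) (hd : b d = false) (xs : List T) :
    ((List.range xs.length).map (fun j =>
        if b (xs.getD j d) then
          ((if 0 < (j : Int) then (1:Int) else 0) +
           (if (j : Int) < (xs.length : Int) - 1 then (1:Int) else 0))
        else 0)).sum
      = 2 * (xs.countP b : Int) - (if b (xs.getD 0 d) then 1 else 0) - pvLastInd b xs := by
  cases xs with
  | nil => simp [pvLastInd, hd]
  | cons x t =>
    rw [List.length_cons, List.range_succ_eq_map, List.map_cons, List.map_map, List.sum_cons]
    have hmap : (List.range t.length).map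
        ((fun j =>
          if b ((x :: t).getD j d) then
            ((if 0 < (j : Int) then (1:Int) else 0) +
             (if (j : Int) < ((t.length + 1 : Nat) : Int) - 1 then (1:Int) else 0))
          else 0) ∘ Nat.succ)
        = (List.range t.length).map (fun j =>
          if b (t.getD j d) then
            ((if 0 < (1:Int) + (j : Int) then (1:Int) else 0) +
             (if (1:Int) + (j : Int) < (1:Int) + (t.length : Int) - 1 then (1:Int) else 0))
          else 0) := by
      apply List.map_congr_left
      intro j hj
      simp only [Function.comp_apply, Nat.succ_eq_add_one, List.getD_cons_succ, List.length_cons]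
      by_cases hb : b (t.getD j d) = true <;> simp only [hb, if_true, if_false] <;>
        push_cast <;> (try split_ifs) <;> omega
    rw [hmap, pv_tailSum b d t 1 (le_refl 1)]
    rw [List.countP_cons]
    cases t with
    | nil =>
      simp only [List.getD_cons_zero, List.length_cons, List.length_nil, List.countP_nil]
      unfold pvLastInd
      by_cases hb : b x = true <;> simp [hb] <;> (try split_ifs) <;> omega
    | cons z t'' =>
      rw [pvLastInd_cons_cons]
      simp only [List.getD_cons_zero, List.length_cons]
      by_cases hb : b x = true <;> simp only [hb, if_true, if_false] <;>
        push_cast <;> (try split_ifs) <;> omega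

-- a fold adding two addends per element equals the sum of the mapped list
theorem pv_foldl_add_map {T : Type} (f g : T → Int) :
    ∀ (l : List T) (a : Int),
    l.foldl (fun acc x => acc + f x + g x) a = a + (l.map (fun x => f x + g x)).sum := by
  intro l
  induction l with
  | nil => intro a; simp
  | cons x t ih => intro a; simp [List.foldl_cons, ih]; ring

-- B's pair sum in the same closed form
theorem pv_pairSum {T : Type} (b : T → Bool) (d : T) (hd : b d = false) :
    ∀ (xs : List T),
    ((xs.zip (xs.drop 1)).map (fun pq =>
        (if b pq.1 then (1:Int) else 0) + (if b pq.2 then 1 else 0))).sum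
      = 2 * (xs.countP b : Int) - (if b (xs.getD 0 d) then 1 else 0) - pvLastInd b xs := by
  intro xs
  induction xs with
  | nil => simp [pvLastInd, hd]
  | cons x t ih =>
    cases t with
    | nil =>
      simp only [List.drop_succ_cons, List.drop_nil, List.zip_nil_right, List.map_nil,
        List.sum_nil, List.countP_cons, List.countP_nil, List.getD_cons_zero]
      unfold pvLastInd
      by_cases hb : b x = true <;> simp [hb]
    | cons y t' =>
      have hzip : (x :: y :: t').zip ((x :: y :: t').drop 1)
          = (x, y) :: ((y :: t').zip ((y :: t').drop 1)) := by
        simp [List.zip_cons_cons]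
      rw [hzip, List.map_cons, List.sum_cons, ih, pvLastInd_cons_cons]
      simp only [List.countP_cons, List.getD_cons_zero]
      by_cases hbx : b x = true <;> by_cases hby : b y = true <;>
        simp only [hbx, hby, if_true, if_false] <;> push_cast <;> omega

-- ===== VERDICT (by name: the statement is the Claim_ definition above) =====
theorem c_s_r_spec : Claim_equal_c_s_r := by
  unfold Claim_equal_c_s_r
  intro xs l_t _
  unfold Spec_c_s_r
  set d : String × Int × Int := ("", 0, 0) with hdd
  set b : (String × Int × Int) → Bool := fun t =>
    if l_t == "horiz" || l_t == "vert" then t.1 == "R" || t.1 == "Q"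
    else if l_t == "diag" then t.1 == "B" || t.1 == "Q"
    else false with hb
  have hd : b d = false := by
    rw [hb, hdd]; split_ifs <;> rfl
  have hpred : ∀ t : String × Int × Int,
      ((if l_t == "horiz" || l_t == "vert" then (["R", "Q"] : List String)
        else if l_t == "diag" then ["B", "Q"] else []).contains t.1) = b t := by
    intro t
    rw [hb]
    split_ifs <;> simp [List.contains_eq_mem] <;>
      constructor <;> intro h <;> rcases h with h | h <;> simp [h]
  have hA : c_s_r xs l_t = ((List.range xs.length).map (fun j =>
      if b (xs.getD j d) then
        ((if 0 < (j : Int) then (1:Int) else 0) +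
         (if (j : Int) < (xs.length : Int) - 1 then (1:Int) else 0))
      else 0)).sum := by
    unfold c_s_r
    have hfun : (fun (a i : Int) =>
        let t := PySem.List.pyGetD xs i ("", 0, 0)
        let p_t := t.1
        let c_t_p_a : Bool :=
          if l_t == "horiz" || l_t == "vert" then p_t == "R" || p_t == "Q"
          else if l_t == "diag" then p_t == "B" || p_t == "Q"
          else false
        if c_t_p_a then
          let a1 := if i > 0 then a + 1 else a
          if i < (xs.length : Int) - 1 then a1 + 1 else a1
        else a)
        = (fun (a i : Int) => a +
            (if b (PySem.List.pyGetD xs i d) then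
              ((if 0 < i then (1:Int) else 0) +
               (if i < (xs.length : Int) - 1 then (1:Int) else 0))
            else 0)) := by
      funext a i
      rw [hb, hdd]
      simp only []
      split_ifs <;> ring
    rw [hfun, PySem.List.foldl_add, zero_add, PySem.List.pyRange_zero_natCast, List.map_map]
    apply congrArg List.sum
    apply List.map_congr_left
    intro j hj
    simp only [Function.comp_apply]
    rw [PySem.List.pyGetD_natCast]
  have hB : c_s_r_alt xs l_t = ((xs.zip (xs.drop 1)).map (fun pq =>
      (if b pq.1 then (1:Int) else 0) + (if b pq.2 then 1 else 0))).sum := by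
    unfold c_s_r_alt
    simp only []
    rw [pv_foldl_add_map (fun pq : (String × Int × Int) × (String × Int × Int) =>
        (if ((if l_t == "horiz" || l_t == "vert" then (["R", "Q"] : List String)
              else if l_t == "diag" then ["B", "Q"] else []).contains pq.1.1) then (1:Int) else 0))
        (fun pq : (String × Int × Int) × (String × Int × Int) =>
        (if ((if l_t == "horiz" || l_t == "vert" then (["R", "Q"] : List String)
              else if l_t == "diag" then ["B", "Q"] else []).contains pq.2.1) then (1:Int) else 0))]
    rw [zero_add]
    apply congrArg List.sum
    apply List.map_congr_left
    intro pq _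
    rw [hpred pq.1, hpred pq.2]
  rw [hA, hB, pv_mainSum b d hd xs, pv_pairSum b d hd xs]
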